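-- pv_equiv track=rewrite | github.com/maoulee/RelationRior | src/subgraph_kgqa/inference/history.py | _split_feedback_content
-- ===== SOURCE A (Python) =====
-- def _split_feedback_content(content: str) -> tuple[str, str]:
--     hint_start = -1
--     for marker in ("\n[REPAIR MODE", "\n[STAGE", "\n[DISCOVERY PHASE", "\n[Phase"):
--         idx = content.find(marker)
--         if idx != -1 and (hint_start == -1 or idx < hint_start):
--             hint_start = idx
--     if hint_start == -1:
--         return content, ""
--     return content[:hint_start], content[hint_start:]
-- ===== SOURCE B (Python) =====
-- def _split_feedback_content(content: str) -> tuple[str, str]: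
--     markers = ("\n[REPAIR MODE", "\n[STAGE", "\n[DISCOVERY PHASE", "\n[Phase")
--     for i in range(len(content)):
--         if content.startswith(markers, i):
--             return content[:i], content[i:]
--     return content, ""
-- ===== Notes on version B (the rewrite author's own statement) =====
-- stated objective: alternative
-- what changed: A runs four full str.find passes and keeps a running minimum index; B makes a single left-to-right scan over the positions of content and stops at the first position where any of the four markers matches (content.startswith with a marker tuple), so no minimum tracking and no full passes.
import Mathlib
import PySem

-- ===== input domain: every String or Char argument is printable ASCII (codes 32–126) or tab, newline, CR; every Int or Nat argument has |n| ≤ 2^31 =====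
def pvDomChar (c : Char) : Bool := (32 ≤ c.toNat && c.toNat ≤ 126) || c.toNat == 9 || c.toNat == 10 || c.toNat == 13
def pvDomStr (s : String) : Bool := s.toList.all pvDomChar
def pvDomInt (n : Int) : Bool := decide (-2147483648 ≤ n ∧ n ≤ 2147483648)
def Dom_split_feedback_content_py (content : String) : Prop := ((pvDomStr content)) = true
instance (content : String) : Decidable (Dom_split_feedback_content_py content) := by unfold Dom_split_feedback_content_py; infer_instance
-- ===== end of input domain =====

-- B replaces A's four full find passes with running-minimum tracking by a single
-- left-to-right scan that stops at the first position where any marker matches (objective: alternative).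

-- ===== PORT A =====
def split_feedback_content_py (content : String) : String × String :=
  let hint_start : Int :=
    ["\n[REPAIR MODE", "\n[STAGE", "\n[DISCOVERY PHASE", "\n[Phase"].foldl
      (fun hs marker =>
        let idx := PySem.Str.find content marker
        if idx ≠ -1 ∧ (hs = -1 ∨ idx < hs) then idx else hs) (-1)
  if hint_start = -1 then (content, "")
  else (PySem.Str.slice content none (some hint_start),
        PySem.Str.slice content (some hint_start) none)

-- ===== PORT B =====
-- the marker tuple of Source B, as code-point lists
def pvMarkersL : List (List Char) :=
  ["\n[REPAIR MODE".toList, "\n[STAGE".toList, "\n[DISCOVERY PHASE".toList, "\n[Phase".toList]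

-- content.startswith(markers, i): does any marker match at the head of the remaining suffix?
def pvHit (l : List Char) : Bool := pvMarkersL.any (fun m => PySem.Chars.startswith l m)

-- the for-i-in-range loop of Source B: walk the suffixes left to right, return the first matching index
def pvScan : List Char → Nat → Option Nat
  | [], _ => none
  | c :: t, i => if pvHit (c :: t) then some i else pvScan t (i + 1)

def split_feedback_content_py_alt (content : String) : String × String :=
  match pvScan content.toList 0 with
  | none => (content, "")
  | some i => (PySem.Str.slice content none (some (i : Int)),
               PySem.Str.slice content (some (i : Int)) none)

-- ===== PRECONDITION & SPEC =====
def Spec_split_feedback_content_py (content : String) (out : String × String) : Prop := out = split_feedback_content_py_alt content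
instance (content : String) (out : String × String) : Decidable (Spec_split_feedback_content_py content out) := by unfold Spec_split_feedback_content_py; infer_instance

-- ===== CLAIM (what is proved, stated in full; the proofs are below) =====
def Claim_equal_split_feedback_content_py : Prop := ∀ (content : String), Dom_split_feedback_content_py content → Spec_split_feedback_content_py content (split_feedback_content_py content)

-- ===== LEMMAS AND PROOFS =====

-- characterization of A's running-minimum fold over any marker list
theorem pv_fold_char (cs : List Char) (ms : List (List Char)) :
    (ms.foldl (fun hs m =>
        let idx := PySem.Chars.find cs m
        if idx ≠ -1 ∧ (hs = -1 ∨ idx < hs) then idx else hs) (-1) = -1 ∧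
      ∀ m ∈ ms, PySem.Chars.find cs m = -1) ∨
    (0 ≤ ms.foldl (fun hs m =>
        let idx := PySem.Chars.find cs m
        if idx ≠ -1 ∧ (hs = -1 ∨ idx < hs) then idx else hs) (-1) ∧
      (∃ m ∈ ms, PySem.Chars.find cs m = ms.foldl (fun hs m =>
        let idx := PySem.Chars.find cs m
        if idx ≠ -1 ∧ (hs = -1 ∨ idx < hs) then idx else hs) (-1)) ∧
      ∀ m ∈ ms, PySem.Chars.find cs m = -1 ∨
        ms.foldl (fun hs m =>
          let idx := PySem.Chars.find cs m
          if idx ≠ -1 ∧ (hs = -1 ∨ idx < hs) then idx else hs) (-1) ≤ PySem.Chars.find cs m) := by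
  induction ms using List.reverseRecOn with
  | nil => exact Or.inl ⟨rfl, by simp⟩
  | append_singleton ms m ih =>
    rw [List.foldl_append, List.foldl_cons, List.foldl_nil]
    set h := ms.foldl (fun hs m =>
        let idx := PySem.Chars.find cs m
        if idx ≠ -1 ∧ (hs = -1 ∨ idx < hs) then idx else hs) (-1) with hh
    simp only
    split_ifs with hc
    · -- new minimum taken: it is find cs m, which is ≠ -1 so ≥ 0
      have hnn : 0 ≤ PySem.Chars.find cs m := by
        rcases (PySem.Chars.neg_one_le_find cs m).lt_or_eq with h1 | h1
        · omega
        · exact absurd h1.symm hc.1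
      refine Or.inr ⟨hnn, ⟨m, by simp, rfl⟩, ?_⟩
      intro m' hm'
      rcases List.mem_append.mp hm' with hm' | hm'
      · rcases ih with ⟨h1, h2⟩ | ⟨h1, _, h3⟩
        · exact Or.inl (h2 m' hm')
        · rcases h3 m' hm' with h4 | h4
          · exact Or.inl h4
          · right
            rcases hc.2 with h5 | h5
            · omega
            · omega
      · simp at hm'; subst hm'; right; omega
    · -- keep the old value
      push_neg at hc
      rcases ih with ⟨h1, h2⟩ | ⟨h1, h2, h3⟩
      · -- old h = -1, so the condition failed because find cs m = -1
        by_cases hf : PySem.Chars.find cs m = -1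
        · exact Or.inl ⟨h1, by
            intro m' hm'
            rcases List.mem_append.mp hm' with hm' | hm'
            · exact h2 m' hm'
            · simp at hm'; subst hm'; exact hf⟩
        · exact absurd h1 (hc hf).1
      · refine Or.inr ⟨h1, ?_, ?_⟩
        · obtain ⟨m', hm', he⟩ := h2
          exact ⟨m', List.mem_append.mpr (Or.inl hm'), he⟩
        · intro m' hm'
          rcases List.mem_append.mp hm' with hm' | hm'
          · exact h3 m' hm'
          · simp at hm'; subst hm'
            by_cases hf : PySem.Chars.find cs m' = -1
            · exact Or.inl hf
            · have := hc hf; right; omega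

theorem pv_hit_iff (l : List Char) :
    pvHit l = true ↔ ∃ m ∈ pvMarkersL, m <+: l := by
  unfold pvHit
  simp only [List.any_eq_true, PySem.Chars.startswith_iff]

theorem pv_scan_none (cs : List Char) (i : Nat)
    (h : ∀ j, pvHit (cs.drop j) = false) : pvScan cs i = none := by
  induction cs generalizing i with
  | nil => rfl
  | cons c t ih =>
    have h0 := h 0
    simp only [List.drop_zero] at h0
    simp only [pvScan, h0, Bool.false_eq_true, if_false]
    exact ih (i + 1) (fun j => h (j + 1))

theorem pv_scan_some (cs : List Char) (i k : Nat)
    (hk : pvHit (cs.drop k) = true) (hlt : ∀ j < k, pvHit (cs.drop j) = false) :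
    pvScan cs i = some (i + k) := by
  induction cs generalizing i k with
  | nil =>
    exfalso
    simp only [List.drop_nil] at hk
    have : pvHit ([] : List Char) = false := by decide
    rw [this] at hk; exact Bool.false_ne_true hk
  | cons c t ih =>
    by_cases h0 : pvHit (c :: t) = true
    · have hk0 : k = 0 := by
        by_contra hne
        have := hlt 0 (Nat.pos_of_ne_zero hne)
        simp only [List.drop_zero] at this
        rw [this] at h0; exact Bool.false_ne_true h0
      subst hk0
      simp [pvScan, h0]
    · have hkne : k ≠ 0 := by
        intro he; subst he; simp only [List.drop_zero] at hk; exact h0 hk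
      obtain ⟨k', rfl⟩ := Nat.exists_eq_succ_of_ne_zero hkne
      have := ih (i + 1) k' (by simpa using hk)
        (fun j hj => by simpa using hlt (j + 1) (by omega))
      simp only [pvScan, eq_false_of_ne_true h0, Bool.false_eq_true, if_false]
      rw [this]; congr 1; omega

-- ===== VERDICT (by name: the statement is the Claim_ definition above) =====
theorem split_feedback_content_py_spec : Claim_equal_split_feedback_content_py := by
  intro content _
  unfold Spec_split_feedback_content_py split_feedback_content_py split_feedback_content_py_alt
  simp only [PySem.Str.find_eq]
  have hmap : ((["\n[REPAIR MODE", "\n[STAGE", "\n[DISCOVERY PHASE", "\n[Phase"] : List String).map String.toList) = pvMarkersL := rfl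
  rw [show (["\n[REPAIR MODE", "\n[STAGE", "\n[DISCOVERY PHASE", "\n[Phase"] : List String).foldl
      (fun hs marker =>
        let idx := PySem.Chars.find content.toList marker.toList
        if idx ≠ -1 ∧ (hs = -1 ∨ idx < hs) then idx else hs) (-1)
      = pvMarkersL.foldl
      (fun hs m =>
        let idx := PySem.Chars.find content.toList m
        if idx ≠ -1 ∧ (hs = -1 ∨ idx < hs) then idx else hs) (-1) from by
    rw [← hmap, List.foldl_map]]
  set cs := content.toList with hcs
  rcases pv_fold_char cs pvMarkersL with ⟨h1, h2⟩ | ⟨h1, ⟨m0, hm0, hfm0⟩, h3⟩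
  · -- no marker occurs: both return (content, "")
    rw [h1]
    have hscan : pvScan cs 0 = none := by
      apply pv_scan_none
      intro j
      by_contra hb
      have := (pv_hit_iff (cs.drop j)).mp (Bool.of_not_eq_false hb)
      obtain ⟨m, hm, hp⟩ := this
      have hinf : m <:+: cs := ⟨cs.take j, (cs.drop j).drop m.length, by
        obtain ⟨t, ht⟩ := hp
        have ht2 : (cs.drop j).drop m.length = t := by rw [← ht]; simp
        rw [ht2, List.append_assoc, ht, List.take_append_drop]⟩
      have := (PySem.Chars.find_eq_neg_one_iff cs m).mp (h2 m hm)
      exact this hinf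
    rw [hscan]
    simp
  · -- earliest occurrence at h = hint_start ≥ 0
    set h := pvMarkersL.foldl
      (fun hs m =>
        let idx := PySem.Chars.find cs m
        if idx ≠ -1 ∧ (hs = -1 ∨ idx < hs) then idx else hs) (-1) with hdef
    have hne : ¬ (h = -1) := by omega
    rw [if_neg hne]
    have hspec := PySem.Chars.find_spec (s := cs) (sub := m0) (by omega)
    have hscan : pvScan cs 0 = some (0 + h.toNat) := by
      apply pv_scan_some
      · exact (pv_hit_iff _).mpr ⟨m0, hm0, by rw [hfm0] at hspec; exact hspec.1⟩
      · intro j hj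
        by_contra hb
        obtain ⟨m, hm, hp⟩ := (pv_hit_iff _).mp (Bool.of_not_eq_false hb)
        rcases h3 m hm with hf | hf
        · have hinf : m <:+: cs := ⟨cs.take j, (cs.drop j).drop m.length, by
            obtain ⟨t, ht⟩ := hp
            have ht2 : (cs.drop j).drop m.length = t := by rw [← ht]; simp
            rw [ht2, List.append_assoc, ht, List.take_append_drop]⟩
          exact (PySem.Chars.find_eq_neg_one_iff cs m).mp hf hinf
        · have hnn : 0 ≤ PySem.Chars.find cs m := by omega
          have hspecm := PySem.Chars.find_spec (s := cs) (sub := m) hnn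
          have hjlt : j < (PySem.Chars.find cs m).toNat := by omega
          exact hspecm.2 j hjlt hp
    rw [hscan]
    simp only [Nat.zero_add, Int.toNat_of_nonneg h1]
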